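-- pv_equiv track=rewrite | github.com/Jarkendar/Note_Recognizer | Files/Main.py | detectStartsAndEndsBlobs
-- ===== SOURCE A (Python) =====
-- def rowContainWhite(row):
--     for i in range(len(row)):
--         if row[i] == 1:
--             return True
--     return False
--
-- def detectStartsAndEndsBlobs(image):
--     starts = []
--     ends = []
--     isBlob = False
--     counter = 0
--     for row in image:
--         whiteInRow = rowContainWhite(row)
--         if not isBlob and whiteInRow:
--             starts.append(counter)
--             isBlob = True
--         if isBlob and not whiteInRow:
--             ends.append(counter)
--             isBlob = False
--         counter += 1
--     return starts, ends
-- ===== SOURCE B (Python) =====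
-- def detectStartsAndEndsBlobs(image):
--     whites = [1 in row for row in image]
--     starts = [i for i in range(len(whites)) if whites[i] and (i == 0 or not whites[i - 1])]
--     ends = [i for i in range(len(whites)) if not whites[i] and i > 0 and whites[i - 1]]
--     return starts, ends
-- ===== Notes on version B (the rewrite author's own statement) =====
-- stated objective: alternative
-- what changed: Replaces the single stateful isBlob/counter loop with a precomputed boolean row-has-white vector followed by two independent adjacency-scanning index comprehensions for starts and ends.
import Mathlib
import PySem

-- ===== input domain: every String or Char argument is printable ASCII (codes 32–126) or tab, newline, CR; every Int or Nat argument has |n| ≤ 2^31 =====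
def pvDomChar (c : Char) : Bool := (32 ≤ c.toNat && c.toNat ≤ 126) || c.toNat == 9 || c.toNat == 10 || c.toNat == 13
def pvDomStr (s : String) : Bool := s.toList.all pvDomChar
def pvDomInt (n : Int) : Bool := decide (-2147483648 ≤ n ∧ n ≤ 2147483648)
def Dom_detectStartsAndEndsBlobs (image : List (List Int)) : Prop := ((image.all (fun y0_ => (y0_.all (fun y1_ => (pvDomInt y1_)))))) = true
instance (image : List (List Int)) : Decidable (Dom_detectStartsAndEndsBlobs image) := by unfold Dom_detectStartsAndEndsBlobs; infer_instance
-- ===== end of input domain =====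

-- B replaces A's single stateful isBlob/counter loop by a precomputed row-has-white
-- boolean vector plus two independent adjacency scans (alternative decomposition, same cost).

-- ===== PORT A =====
-- Python's early-return index loop over the row, as structural recursion
def rowContainWhite : List Int → Bool
  | [] => false
  | x :: xs => if x == 1 then true else rowContainWhite xs

-- A's for-loop over rows with state (starts, ends, isBlob, counter)
def detectLoop : List (List Int) → List Int → List Int → Bool → Int → List Int × List Int
  | [], starts, ends, _, _ => (starts, ends)
  | row :: rest, starts, ends, isBlob, counter =>
    let whiteInRow := rowContainWhite row
    let p1 : List Int × Bool :=
      if !isBlob && whiteInRow then (starts ++ [counter], true) else (starts, isBlob)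
    let p2 : List Int × Bool :=
      if p1.2 && !whiteInRow then (ends ++ [counter], false) else (ends, p1.2)
    detectLoop rest p1.1 p2.1 p2.2 (counter + 1)

def detectStartsAndEndsBlobs (image : List (List Int)) : List Int × List Int :=
  detectLoop image [] [] false 0

-- ===== PORT B =====
def detectStartsAndEndsBlobs_alt (image : List (List Int)) : List Int × List Int :=
  let whites := image.map (fun row => row.contains 1)
  let starts := ((List.range whites.length).filter
      (fun i => whites.getD i false && (i == 0 || !(whites.getD (i - 1) false)))).map
      (fun i => (i : Int))
  let ends := ((List.range whites.length).filter
      (fun i => !(whites.getD i false) && decide (0 < i) && whites.getD (i - 1) false)).map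
      (fun i => (i : Int))
  (starts, ends)

-- ===== PRECONDITION & SPEC =====
def Spec_detectStartsAndEndsBlobs (image : List (List Int)) (out : List Int × List Int) : Prop := out = detectStartsAndEndsBlobs_alt image
instance (image : List (List Int)) (out : List Int × List Int) : Decidable (Spec_detectStartsAndEndsBlobs image out) := by unfold Spec_detectStartsAndEndsBlobs; infer_instance

-- ===== CLAIM (what is proved, stated in full; the proofs are below) =====
def Claim_equal_detectStartsAndEndsBlobs : Prop := ∀ (image : List (List Int)), Dom_detectStartsAndEndsBlobs image → Spec_detectStartsAndEndsBlobs image (detectStartsAndEndsBlobs image)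

-- ===== LEMMAS AND PROOFS =====

-- reference: starts/ends produced from the white vector, given the previous row's whiteness
def specS : List Bool → Bool → Int → List Int
  | [], _, _ => []
  | w :: ws, prev, i => (if w && !prev then [i] else []) ++ specS ws w (i + 1)

def specE : List Bool → Bool → Int → List Int
  | [], _, _ => []
  | w :: ws, prev, i => (if !w && prev then [i] else []) ++ specE ws w (i + 1)

theorem rowContainWhite_eq (row : List Int) : rowContainWhite row = row.contains 1 := by
  induction row with
  | nil => rfl
  | cons x xs ih =>
    rw [rowContainWhite]
    cases h : x == 1 with
    | true =>
      have hx : x = 1 := by simpa using h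
      simp [hx]
    | false =>
      have hx : x ≠ 1 := by simpa using h
      have h1 : ((1 : Int) == x) = false := by
        simp only [beq_eq_false_iff_ne]
        exact fun he => hx he.symm
      simp [List.contains_cons, ih, h1]
      exact fun he => absurd he.symm hx

theorem detectLoop_eq (image : List (List Int)) :
    ∀ (starts ends : List Int) (isBlob : Bool) (counter : Int),
    detectLoop image starts ends isBlob counter =
      (starts ++ specS (image.map (fun row => row.contains 1)) isBlob counter,
       ends ++ specE (image.map (fun row => row.contains 1)) isBlob counter) := by
  induction image with
  | nil => intro s e b c; simp [detectLoop, specS, specE]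
  | cons row rest ih =>
    intro s e b c
    simp only [detectLoop, rowContainWhite_eq, List.map_cons, specS, specE]
    cases hw : row.contains 1 <;> cases b <;>
      simp [ih, List.append_assoc]

-- the adjacency-scan over absolute indices equals the reference over the suffix
theorem range'_filter_spec (W : List Bool) :
    ∀ (k : Nat), (hk : k ≤ W.length) →
    (((List.range' k (W.length - k)).filter
        (fun i => W.getD i false && (i == 0 || !(W.getD (i - 1) false)))).map (fun i => (i : Int))
      = specS (W.drop k) (if k = 0 then false else W.getD (k - 1) false) (k : Int)) ∧
    (((List.range' k (W.length - k)).filter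
        (fun i => !(W.getD i false) && decide (0 < i) && W.getD (i - 1) false)).map (fun i => (i : Int))
      = specE (W.drop k) (if k = 0 then false else W.getD (k - 1) false) (k : Int)) := by
  intro k
  induction hn : W.length - k generalizing k with
  | zero =>
    intro hk
    have : W.length ≤ k := by omega
    have hd : W.drop k = [] := List.drop_eq_nil_of_le this
    simp [hd, specS, specE]
  | succ m ih =>
    intro hk
    have hklt : k < W.length := by omega
    obtain ⟨w, rest, hdrop⟩ : ∃ w rest, W.drop k = w :: rest := by
      cases h : W.drop k with
      | nil => exfalso; have := List.length_drop (l := W) (i := k); rw [h] at this; simp at this; omega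
      | cons a l => exact ⟨a, l, rfl⟩
    have hWk : (W[k]?).getD false = w := by
      have h0 : (W.drop k)[0]? = some w := by rw [hdrop]; rfl
      rw [List.getElem?_drop, Nat.add_zero] at h0
      rw [h0]; rfl
    have hdrop1 : W.drop (k + 1) = rest := by
      have : W.drop (k + 1) = (W.drop k).drop 1 := by
        rw [List.drop_drop]
      rw [this, hdrop]; rfl
    have hrange : List.range' k (m + 1) = k :: List.range' (k + 1) m := by
      simp [List.range'_succ]
    have ihk := ih (k + 1) (by omega) (by omega)
    have hprev : (if k + 1 = 0 then false else W.getD (k + 1 - 1) false) = w := by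
      simp [List.getD, hWk]
    rw [hdrop1, hprev] at ihk
    have hcast : ((k + 1 : Nat) : Int) = (k : Int) + 1 := by push_cast; ring
    rw [hcast] at ihk
    constructor
    · rw [hrange, hdrop, specS]
      simp only [List.filter_cons]
      rw [← ihk.1]
      by_cases hk0 : k = 0
      · subst hk0; cases w <;> simp [List.getD, hWk]
      · have hkpos : 0 < k := Nat.pos_of_ne_zero hk0
        cases w <;> cases hb : (W[k - 1]?).getD false <;>
          simp [List.getD, hWk, hb, hk0, hkpos]
    · rw [hrange, hdrop, specE]
      simp only [List.filter_cons]
      rw [← ihk.2]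
      by_cases hk0 : k = 0
      · subst hk0; cases w <;> simp [List.getD, hWk]
      · have hkpos : 0 < k := Nat.pos_of_ne_zero hk0
        cases w <;> cases hb : (W[k - 1]?).getD false <;>
          simp [List.getD, hWk, hb, hk0, hkpos]

theorem range_filter_spec0 (W : List Bool) :
    (((List.range W.length).filter
        (fun i => W.getD i false && (i == 0 || !(W.getD (i - 1) false)))).map (fun i => (i : Int))
      = specS W false 0) ∧
    (((List.range W.length).filter
        (fun i => !(W.getD i false) && decide (0 < i) && W.getD (i - 1) false)).map (fun i => (i : Int))
      = specE W false 0) := by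
  have h := range'_filter_spec W 0 (Nat.zero_le _)
  simpa [List.range_eq_range'] using h

-- ===== VERDICT (by name: the statement is the Claim_ definition above) =====
theorem detectStartsAndEndsBlobs_spec : Claim_equal_detectStartsAndEndsBlobs := by
  intro image _
  unfold Spec_detectStartsAndEndsBlobs detectStartsAndEndsBlobs
  rw [detectLoop_eq]
  simp only [detectStartsAndEndsBlobs_alt, List.nil_append]
  obtain ⟨h1, h2⟩ := range_filter_spec0 (image.map (fun row => row.contains 1))
  rw [h1, h2]
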